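/- GENERATED by tools/from_farm_form.py from prooffarm-gif/accepted/GifMakeMapObject.1/Lemmas.lean (a worked proof of the farm's unit `GifMakeMapObject.1`,
   accepted by the verdict) — do not edit. -/
import Gif.Spec.Units.GifMakeMapObject_1

/-!
  Lemmas for the unit `GifMakeMapObject.1` (0x107900 … 0x10793b and 0x1079a7; gifalloc.c:42-56): the one bit fact of the test of l.48.
-/

open X86 X86.User Asan ProgX.Base ProgX.Base.Spec Gif.Spec

namespace Gif.Spec.GifMakeMapObject_1

/-- **`1 << GifBitSize(n)` is at least 2** (l.48: `mov eax, 1 ; mov ecx, r12d ; shl eax, cl`): the result `z` of GifBitSize is between 1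
and 9, so the shift count `cl & 31` is `z` and the 32-bit result is `2 ^ z`. -/
theorem mm1_shift_ge_two (z : Word) (h1 : 1 ≤ z.toNat) (h9 : z.toNat ≤ 9) :
    2 ≤ (1#32 <<< ((BitVec.setWidth 8 (Word.part .w32 z)).toNat % 32)).toNat := by
  have e : (BitVec.setWidth 8 (Word.part .w32 z)).toNat = z.toNat := by
    rw [BitVec.toNat_setWidth, toNat_part32]
    omega
  rw [e]
  generalize z.toNat = k at h1 h9
  have hk : k = 1 ∨ k = 2 ∨ k = 3 ∨ k = 4 ∨ k = 5 ∨ k = 6 ∨ k = 7 ∨ k = 8 ∨ k = 9 := by omega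
  rcases hk with rfl | rfl | rfl | rfl | rfl | rfl | rfl | rfl | rfl <;> decide

end Gif.Spec.GifMakeMapObject_1
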